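-- pv_equiv track=rewrite | github.com/Flosten/final_project | src/Evaluation.py | extract_event_starts
-- ===== SOURCE A (Python) =====
-- def extract_event_starts(truth, label):
--     """
--     Extract the start indices of dangerous events in the truth array for a given label.
--
--     Parameters:
--         truth (list): True labels array.
--         label (int): The label for which to extract event starts.
--
--     Returns:
--         list: List of start indices for the specified label.
--     """
--     event_starts = []
--     prev = -1
--     for i, val in enumerate(truth):
--         if val == label and prev != label:
--             event_starts.append(i)
--         prev = val
--     return event_starts
-- ===== SOURCE B (Python) =====
-- def extract_event_starts(truth, label):
--     """Run-based re-implementation: find each maximal run of equal values with an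
--     inner scan and jump the index over it, instead of A's element-by-element pass."""
--     starts = []
--     prev = -1
--     idx = 0
--     n = len(truth)
--     while idx < n:
--         key = truth[idx]
--         j = idx + 1
--         while j < n and truth[j] == key:
--             j += 1
--         if key == label and prev != label:
--             starts.append(idx)
--         prev = key
--         idx = j
--     return starts
-- ===== Notes on version B (the rewrite author's own statement) =====
-- stated objective: alternative
-- what changed: B detects run starts by grouping consecutive equal values (inner scan finds each run length and jumps over it) instead of A's per-element pass comparing each value with the previous one.
import Mathlib
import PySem

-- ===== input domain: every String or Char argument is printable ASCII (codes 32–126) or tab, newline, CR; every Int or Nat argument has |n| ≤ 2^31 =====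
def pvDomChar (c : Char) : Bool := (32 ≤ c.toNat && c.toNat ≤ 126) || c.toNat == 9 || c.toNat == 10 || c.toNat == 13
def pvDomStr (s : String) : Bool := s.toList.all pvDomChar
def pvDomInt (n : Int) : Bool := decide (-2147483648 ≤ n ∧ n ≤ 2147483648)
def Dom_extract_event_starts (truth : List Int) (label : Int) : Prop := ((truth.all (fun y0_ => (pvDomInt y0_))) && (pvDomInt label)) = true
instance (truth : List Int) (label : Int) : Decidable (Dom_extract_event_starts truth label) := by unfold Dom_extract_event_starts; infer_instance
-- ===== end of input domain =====

-- B walks maximal runs of equal values instead of A's element-by-element pass; same return value, proved equal on all inputs.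

-- ===== PORT A =====
-- A's loop: for i, val in enumerate(truth): if val == label and prev != label: append i; prev = val
def pvGoA (label : Int) : List Int → Int → Int → List Int → List Int
  | [], _, _, acc => acc
  | v :: tl, i, prev, acc =>
      pvGoA label tl (i + 1) v (if v == label && !(prev == label) then acc ++ [i] else acc)

def extract_event_starts (truth : List Int) (label : Int) : List Int :=
  pvGoA label truth 0 (-1) []

-- ===== PORT B =====
-- B's inner while loop 'while j < n and truth[j] == key': length of the run of `key`
-- at the front of the remaining suffix (the suffix truth[idx:] is carried as a list)
def pvRun (key : Int) : List Int → Nat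
  | [] => 0
  | x :: xs => if x == key then 1 + pvRun key xs else 0

-- B's outer while loop: each step consumes one whole run (idx advances by 1 + r)
def pvGoB (label : Int) : List Int → Int → Int → List Int → List Int
  | [], _, _, acc => acc
  | key :: tl, idx, prev, acc =>
      let r := pvRun key tl
      pvGoB label (tl.drop r) (idx + 1 + (r : Int)) key
        (if key == label && !(prev == label) then acc ++ [idx] else acc)
  termination_by l => l.length
  decreasing_by simp [List.length_drop]

def extract_event_starts_alt (truth : List Int) (label : Int) : List Int :=
  pvGoB label truth 0 (-1) []

-- ===== PRECONDITION & SPEC =====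
def Spec_extract_event_starts (truth : List Int) (label : Int) (out : List Int) : Prop := out = extract_event_starts_alt truth label
instance (truth : List Int) (label : Int) (out : List Int) : Decidable (Spec_extract_event_starts truth label out) := by unfold Spec_extract_event_starts; infer_instance

-- ===== CLAIM (what is proved, stated in full; the proofs are below) =====
def Claim_equal_extract_event_starts : Prop := ∀ (truth : List Int) (label : Int), Dom_extract_event_starts truth label → Spec_extract_event_starts truth label (extract_event_starts truth label)

-- ===== LEMMAS AND PROOFS =====

theorem pvGoB_nil (label i prev : Int) (acc : List Int) : pvGoB label [] i prev acc = acc := by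
  rw [pvGoB]

theorem pvGoB_cons (label key i prev : Int) (tl acc : List Int) :
    pvGoB label (key :: tl) i prev acc =
      pvGoB label (tl.drop (pvRun key tl)) (i + 1 + (pvRun key tl : Int)) key
        (if key == label && !(prev == label) then acc ++ [i] else acc) := by
  conv_lhs => unfold pvGoB

theorem pvGoA_acc (label : Int) (l : List Int) : ∀ (i prev : Int) (acc : List Int),
    pvGoA label l i prev acc = acc ++ pvGoA label l i prev [] := by
  induction l with
  | nil => intro i prev acc; simp [pvGoA]
  | cons v tl ih =>
      intro i prev acc
      simp only [pvGoA]
      split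
      · rw [ih (i + 1) v (acc ++ [i]), ih (i + 1) v ([] ++ [i])]; simp
      · exact ih _ _ _

theorem pvGoB_acc (label : Int) : ∀ (n : Nat) (l : List Int), l.length ≤ n →
    ∀ (i prev : Int) (acc : List Int),
    pvGoB label l i prev acc = acc ++ pvGoB label l i prev [] := by
  intro n
  induction n with
  | zero =>
      intro l hl i prev acc
      have : l = [] := List.eq_nil_of_length_eq_zero (Nat.le_zero.mp hl)
      subst this; simp [pvGoB_nil]
  | succ m ih =>
      intro l hl i prev acc
      cases l with
      | nil => simp [pvGoB_nil]
      | cons key tl =>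
          have hlen : (tl.drop (pvRun key tl)).length ≤ m := by
            simp only [List.length_cons] at hl
            have : (tl.drop (pvRun key tl)).length = tl.length - pvRun key tl :=
              List.length_drop
            omega
          simp only [pvGoB_cons]
          split
          · rw [ih _ hlen _ key (acc ++ [i]), ih _ hlen _ key ([] ++ [i])]; simp
          · exact ih _ hlen _ _ _

-- skipping a run: A applied to the rest of a run with prev = key agrees with B's jump over the run
theorem pvSkip (label : Int) : ∀ (tl : List Int) (i key : Int),
    (∀ l' : List Int, l'.length ≤ tl.length → ∀ i prev : Int,
        pvGoA label l' i prev [] = pvGoB label l' i prev []) →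
    pvGoA label tl i key [] = pvGoB label (tl.drop (pvRun key tl)) (i + (pvRun key tl : Int)) key [] := by
  intro tl
  induction tl with
  | nil => intro i key _; simp [pvRun, pvGoA, pvGoB_nil]
  | cons x xs ih =>
      intro i key h
      by_cases hx : x = key
      · subst hx
        have hcond : (x == label && !(x == label)) = false := by
          by_cases hxl : x = label <;> simp [hxl]
        have hr : pvRun x (x :: xs) = 1 + pvRun x xs := by simp [pvRun]
        have hstep : pvGoA label (x :: xs) i x [] = pvGoA label xs (i + 1) x [] := by
          simp [pvGoA, hcond]
        rw [hstep, ih (i + 1) x (fun l' hl' => h l' (by simpa using Nat.le_succ_of_le hl')), hr]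
        have hdrop : List.drop (1 + pvRun x xs) (x :: xs) = List.drop (pvRun x xs) xs := by
          rw [Nat.add_comm]; simp [List.drop_succ_cons]
        rw [hdrop]
        congr 1
        push_cast; ring
      · have hr : pvRun key (x :: xs) = 0 := by simp [pvRun, hx]
        rw [hr]
        simpa using h (x :: xs) le_rfl i key

theorem pvMain (label : Int) : ∀ (n : Nat) (l : List Int), l.length ≤ n → ∀ (i prev : Int),
    pvGoA label l i prev [] = pvGoB label l i prev [] := by
  intro n
  induction n with
  | zero =>
      intro l hl i prev
      have : l = [] := List.eq_nil_of_length_eq_zero (Nat.le_zero.mp hl)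
      subst this; simp [pvGoA, pvGoB_nil]
  | succ m ih =>
      intro l hl i prev
      cases l with
      | nil => simp [pvGoA, pvGoB_nil]
      | cons key tl =>
          have hlen : tl.length ≤ m := by simp only [List.length_cons] at hl; omega
          have hskip := pvSkip label tl (i + 1) key
            (fun l' hl' i' prev' => ih l' (le_trans hl' hlen) i' prev')
          simp only [pvGoA, pvGoB_cons]
          rw [pvGoA_acc, pvGoB_acc label (tl.drop (pvRun key tl)).length _ le_rfl]
          rw [hskip]

-- ===== VERDICT (by name: the statement is the Claim_ definition above) =====
theorem extract_event_starts_spec : Claim_equal_extract_event_starts := by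
  intro truth label _
  unfold Spec_extract_event_starts extract_event_starts extract_event_starts_alt
  exact pvMain label truth.length truth le_rfl 0 (-1)
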